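-- pv_equiv track=rewrite | github.com/james-hinton/Deep-Learning-Music-Prediction | GuitarRNN Interval and Duration/validateDuration.py | processOriginal
-- ===== SOURCE A (Python) =====
-- def processOriginal(notes, validateNotes):
-- 	output_size = len(set(notes))
-- 	durationLength = 16
-- 	durationKeys = sorted(set(item for item in notes))
-- 	durationDictionary = dict((note, number) for number, note in enumerate(durationKeys))
--
-- 	x_input = []
-- 	y_output = []
--
-- 	# Create rolling list
-- 	for i in range(0, len(validateNotes) - durationLength, 1):
-- 		rollingListIn = validateNotes[i:i + durationLength]
-- 		rollingListOut = validateNotes[i + durationLength]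
-- 		x_input.append([durationDictionary[char] for char in rollingListIn])
-- 		y_output.append(rollingListOut)
--
-- 	inputLength = len(x_input)
-- 	return x_input, y_output, durationKeys, output_size
-- ===== SOURCE B (Python) =====
-- def processOriginal(notes, validateNotes):
--     durationKeys = sorted(set(notes))
--     output_size = len(durationKeys)
--
--     def rank(v):
--         # index of v in durationKeys = number of distinct notes strictly below v
--         return sum(1 for k in durationKeys if k < v)
--
--     x_input, y_output = [], []
--     window = []
--     for c in validateNotes:
--         if len(window) == 16:
--             x_input.append(window)
--             y_output.append(c)
--             window = window[1:] + [rank(c)]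
--         else:
--             window = window + [rank(c)]
--     return x_input, y_output, durationKeys, output_size
-- ===== Notes on version B (the rewrite author's own statement) =====
-- stated objective: alternative
-- what changed: B replaces the dictionary plus index-loop-with-slicing by a single streaming pass over validateNotes that maintains a rolling 16-element window of codes, where each note is encoded once, as it enters the window, by counting the distinct notes strictly below it (no dictionary at all).
import Mathlib
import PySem

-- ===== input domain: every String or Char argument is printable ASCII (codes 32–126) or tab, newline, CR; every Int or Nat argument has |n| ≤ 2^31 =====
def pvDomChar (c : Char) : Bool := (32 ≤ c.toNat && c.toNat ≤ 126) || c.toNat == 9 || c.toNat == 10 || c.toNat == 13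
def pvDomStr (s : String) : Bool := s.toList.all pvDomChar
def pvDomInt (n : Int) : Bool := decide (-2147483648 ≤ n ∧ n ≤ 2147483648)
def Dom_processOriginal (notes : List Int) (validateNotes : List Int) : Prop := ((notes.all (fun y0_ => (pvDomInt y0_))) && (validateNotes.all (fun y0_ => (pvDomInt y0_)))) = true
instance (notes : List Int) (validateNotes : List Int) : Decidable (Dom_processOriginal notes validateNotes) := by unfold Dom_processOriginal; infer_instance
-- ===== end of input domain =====

-- B drops the dictionary and the index loop with slices: it makes one streaming pass over
-- validateNotes keeping a rolling 16-element window of codes, each note encoded (once, as it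
-- enters the window) as the count of distinct notes strictly below it.
-- ===== PORT A =====
def processOriginal (notes : List Int) (validateNotes : List Int) : List (List Int) × List Int × List Int × Int :=
  let output_size : Int := (PySem.Set.ofList notes).length
  let durationLength : Int := 16
  let durationKeys := PySem.List.sorted (PySem.Set.ofList notes) (fun x => x) false
  let durationDictionary := (PySem.List.enumerate durationKeys 0).foldl
      (fun d p => d.insert p.2 p.1) PySem.Dict.empty
  let st := (PySem.List.pyRange 0 ((validateNotes.length : Int) - durationLength) 1).foldl
      (fun (st : List (List Int) × List Int) i =>
        let rollingListIn := PySem.List.slice validateNotes (some i) (some (i + durationLength))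
        let rollingListOut := PySem.List.pyGetD validateNotes (i + durationLength) 0
        (st.1 ++ [rollingListIn.map (fun c => durationDictionary.getD c 0)],
         st.2 ++ [rollingListOut]))
      ([], [])
  (st.1, st.2, durationKeys, output_size)

-- ===== PORT B =====
-- rank(v) = sum(1 for k in durationKeys if k < v)
def pvRank (durationKeys : List Int) (v : Int) : Int :=
  durationKeys.foldl (fun acc k => if k < v then acc + 1 else acc) 0

def processOriginal_alt (notes : List Int) (validateNotes : List Int) : List (List Int) × List Int × List Int × Int :=
  let durationKeys := PySem.List.sorted (PySem.Set.ofList notes) (fun x => x) false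
  let output_size : Int := durationKeys.length
  let st := validateNotes.foldl
      (fun (st : List (List Int) × List Int × List Int) c =>
        if st.2.2.length = 16 then
          (st.1 ++ [st.2.2], st.2.1 ++ [c],
           PySem.List.slice st.2.2 (some 1) none ++ [pvRank durationKeys c])
        else
          (st.1, st.2.1, st.2.2 ++ [pvRank durationKeys c]))
      ([], [], [])
  (st.1, st.2.1, durationKeys, output_size)

-- ===== PRECONDITION & SPEC =====
-- Pre_ excludes exactly the inputs where Python A raises KeyError: some note among
-- validateNotes[:-1] (the only elements ever used as dictionary keys, and only when
-- a window exists, i.e. len(validateNotes) > 16) does not occur in notes.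
def Pre_processOriginal (notes : List Int) (validateNotes : List Int) : Prop :=
  validateNotes.length ≤ 16 ∨ ∀ x ∈ validateNotes.dropLast, x ∈ notes
instance (notes : List Int) (validateNotes : List Int) : Decidable (Pre_processOriginal notes validateNotes) := by
  unfold Pre_processOriginal; infer_instance
def pvWitness_processOriginal : List Int × List Int :=
  ([0, 1], [0, 1, 0, 1, 0, 1, 0, 1, 0, 1, 0, 1, 0, 1, 0, 1, 0, 7])

def Spec_processOriginal (notes : List Int) (validateNotes : List Int) (out : List (List Int) × List Int × List Int × Int) : Prop := out = processOriginal_alt notes validateNotes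
instance (notes : List Int) (validateNotes : List Int) (out : List (List Int) × List Int × List Int × Int) : Decidable (Spec_processOriginal notes validateNotes out) := by unfold Spec_processOriginal; infer_instance

-- ===== CLAIM (what is proved, stated in full; the proofs are below) =====
def Claim_equal_processOriginal : Prop := ∀ (notes : List Int) (validateNotes : List Int), Dom_processOriginal notes validateNotes → Pre_processOriginal notes validateNotes → Spec_processOriginal notes validateNotes (processOriginal notes validateNotes)

-- ===== LEMMAS AND PROOFS =====

-- a window that stays inside the usable prefix reads the same elements from the list and from its dropLast
theorem take_drop_dropLast {α : Type} (l : List α) (j k : Nat) (h : j + k + 1 ≤ l.length) :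
    (l.dropLast.drop j).take k = (l.drop j).take k := by
  rw [List.dropLast_eq_take, List.drop_take, List.take_take]
  congr 1
  omega

-- every element of an emitted window lies in validateNotes[:-1]
theorem mem_window_dropLast {v : List Int} {k : Nat} {x : Int} (hk : k + 16 < v.length)
    (hx : x ∈ (v.drop k).take 16) : x ∈ v.dropLast := by
  rw [← take_drop_dropLast v k 16 (by omega)] at hx
  exact List.mem_of_mem_drop (List.mem_of_mem_take hx)

theorem pvRank_eq_countP (keys : List Int) (c : Int) :
    pvRank keys c = (keys.countP (fun k => decide (k < c)) : Int) := by
  unfold pvRank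
  rw [show (fun (acc : Int) (k : Int) => if k < c then acc + 1 else acc)
        = (fun acc k => if (fun k => decide (k < c)) k = true then acc + 1 else acc) by
      funext acc k; simp]
  rw [PySem.List.foldl_count_if]
  simp

-- on a strictly increasing key list, the enumerate-dictionary lookup is the rank
theorem dict_getD_eq_rank (keys : List Int) (h : List.Pairwise (· < ·) keys)
    (c : Int) (hc : c ∈ keys) :
    ((PySem.List.enumerate keys 0).foldl (fun d p => d.insert p.2 p.1) PySem.Dict.empty).getD c 0
      = pvRank keys c := by
  induction keys using List.reverseRecOn with
  | nil => cases hc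
  | append_singleton ks k ih =>
    rw [List.pairwise_append] at h
    rw [PySem.List.enumerate_append, List.foldl_append,
        PySem.List.enumerate_cons, PySem.List.enumerate_nil]
    simp only [List.foldl_cons, List.foldl_nil]
    rw [PySem.Dict.getD_insert, pvRank_eq_countP, List.countP_append]
    rcases List.mem_append.mp hc with hcs | hck
    · have hck' : c < k := h.2.2 c hcs k (List.mem_singleton_self k)
      rw [if_neg (by omega), ih h.1 hcs, pvRank_eq_countP]
      have : List.countP (fun k' => decide (k' < c)) [k] = 0 := by
        simp [not_lt.mpr (le_of_lt hck')]
      rw [this]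
      simp
    · have hck' : c = k := List.mem_singleton.mp hck
      rw [if_pos hck']
      have h1 : List.countP (fun k' => decide (k' < c)) ks = ks.length := by
        rw [List.countP_eq_length]
        intro a ha
        simp [hck' ▸ h.2.2 a ha k (List.mem_singleton_self k)]
      have h2 : List.countP (fun k' => decide (k' < c)) [k] = 0 := by
        simp [hck']
      rw [h1, h2]
      simp

-- closed form of B's streaming loop, for any per-element encoder f
theorem streamB (f : Int → Int) (v : List Int) :
    v.foldl
      (fun (st : List (List Int) × List Int × List Int) c =>
        if st.2.2.length = 16 then
          (st.1 ++ [st.2.2], st.2.1 ++ [c],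
           PySem.List.slice st.2.2 (some 1) none ++ [f c])
        else
          (st.1, st.2.1, st.2.2 ++ [f c]))
      ([], [], [])
    = ((List.range (v.length - 16)).map (fun i => ((v.drop i).take 16).map f),
       v.drop 16,
       (v.drop (v.length - 16)).map f) := by
  induction v using List.reverseRecOn with
  | nil => simp
  | append_singleton vs c ih =>
    rw [List.foldl_append, ih]
    simp only [List.foldl_cons, List.foldl_nil]
    by_cases hl : 16 ≤ vs.length
    · rw [if_pos (by simp [List.length_drop]; omega)]
      rw [PySem.List.slice_from _ (by norm_num)]
      have hlen : (vs ++ [c]).length - 16 = (vs.length - 16) + 1 := by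
        simp [List.length_append]; omega
      refine Prod.ext ?_ (Prod.ext ?_ ?_)
      · -- x_input component
        simp only [hlen, List.range_succ, List.map_append, List.map_cons, List.map_nil]
        congr 1
        · refine List.map_congr_left ?_
          intro i hi
          have hi' : i < vs.length - 16 := List.mem_range.mp hi
          rw [List.drop_append_of_le_length (by omega),
              List.take_append_of_le_length (by simp [List.length_drop]; omega)]
        · rw [List.drop_append_of_le_length (by omega),
              List.take_append_of_le_length (by simp [List.length_drop]; omega),
              List.take_of_length_le (by simp [List.length_drop]; omega)]
      · -- y_output component
        simp only
        rw [List.drop_append_of_le_length (by omega)]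
      · -- window component
        simp only
        rw [hlen, List.drop_append_of_le_length (by omega)]
        rw [List.map_append, List.map_drop, List.drop_drop]
        simp [Int.toNat_one, Nat.add_comm]
    · rw [if_neg (by simp [List.length_drop]; omega)]
      have h0 : vs.length - 16 = 0 := by omega
      have h0' : (vs ++ [c]).length - 16 = 0 := by
        simp only [List.length_append, List.length_cons, List.length_nil]
        omega
      refine Prod.ext ?_ (Prod.ext ?_ ?_)
      · simp only [h0, h0'] at *
        simp
      · simp only
        rw [List.drop_of_length_le (by omega),
            List.drop_of_length_le (by simp only [List.length_append, List.length_cons, List.length_nil]; omega)]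
      · simp only [h0, h0']
        simp

-- ===== VERDICT (by name: the statement is the Claim_ definition above) =====
theorem processOriginal_spec : Claim_equal_processOriginal := by
  intro notes v _ hpre
  unfold Spec_processOriginal processOriginal processOriginal_alt
  simp only []
  rw [streamB]
  rw [PySem.List.foldl_prod_mk
      (f := fun acc i => acc ++ [(PySem.List.slice v (some i) (some (i + 16))).map
        (fun c => (((PySem.List.enumerate (PySem.List.sorted (PySem.Set.ofList notes) (fun x => x) false) 0).foldl
          (fun d p => d.insert p.2 p.1) PySem.Dict.empty)).getD c 0)])
      (g := fun acc i => acc ++ [PySem.List.pyGetD v (i + 16) 0])]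
  rw [PySem.List.foldl_append_singleton_eq_map, PySem.List.foldl_append_singleton_eq_map]
  simp only [List.nil_append, Prod.mk.injEq]
  refine ⟨?_, ?_, trivial, ?_⟩
  · -- x_input: each dictionary-mapped slice equals the rank-mapped window
    rw [PySem.List.pyRange_one, List.map_map]
    have hn : ((v.length : Int) - 16 - 0).toNat = v.length - 16 := by omega
    rw [hn]
    refine List.map_congr_left ?_
    intro k hk
    have hk' : k < v.length - 16 := List.mem_range.mp hk
    simp only [Function.comp]
    rw [PySem.List.slice_toNat _ (by omega) (by omega)]
    have h1 : ((0 : Int) + (k : Int)).toNat = k := by omega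
    have h2 : ((0 : Int) + (k : Int) + 16).toNat = k + 16 := by omega
    rw [h1, h2]
    have h16 : k + 16 - k = 16 := by omega
    rw [h16]
    refine List.map_congr_left ?_
    intro x hx
    have hxd : x ∈ v.dropLast := mem_window_dropLast (by omega) hx
    rcases hpre with hsmall | hmem
    · omega
    · have hxn : x ∈ notes := hmem x hxd
      have hxk : x ∈ PySem.List.sorted (PySem.Set.ofList notes) (fun x => x) false := by
        rw [PySem.List.mem_sorted, PySem.Set.mem_ofList]
        exact hxn
      exact dict_getD_eq_rank _ (PySem.List.sorted_ofList_pairwise_lt notes) x hxk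
  · -- y_output component
    have hd : v.drop 16 = v.drop ((16 : Int)).toNat := rfl
    rw [hd, ← PySem.List.map_pyGetD_pyRange' v 0 (a := 16) (by norm_num)]
    rw [PySem.List.pyRange_one, PySem.List.pyRange_one, List.map_map, List.map_map]
    have h16 : ((v.length : Int) - 16 - 0).toNat = ((v.length : Int) - 16).toNat := by omega
    rw [h16]
    refine List.map_congr_left ?_
    intro k _
    simp only [Function.comp]
    congr 1
    ring
  · simp [PySem.List.length_sorted]
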